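-- pv_equiv track=rewrite | github.com/posl/comment_recommendation | script/split_gen/4_time/en/104_D/7.py | abcnum
-- ===== SOURCE A (Python) =====
-- def abcnum(s):
--     a = 0
--     b = 0
--     c = 0
--     abc = 0
--     q = 0
--     for i in s:
--         if i == 'A':
--             a += 1
--         elif i == 'B':
--             b += 1
--         elif i == 'C':
--             c += 1
--         elif i == '?':
--             q += 1
--     abc += a * b * q + a * c * b + b * c * a
--     return (abc % (10**9 + 7))
-- ===== SOURCE B (Python) =====
-- def abcnum(s):
--     def tally(t):
--         # (count of 'A', 'B', 'C', '?') in t, by divide and conquer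
--         if len(t) == 0:
--             return (0, 0, 0, 0)
--         if len(t) == 1:
--             ch = t[0]
--             return (1 if ch == 'A' else 0,
--                     1 if ch == 'B' else 0,
--                     1 if ch == 'C' else 0,
--                     1 if ch == '?' else 0)
--         m = len(t) // 2
--         a1, b1, c1, q1 = tally(t[:m])
--         a2, b2, c2, q2 = tally(t[m:])
--         return (a1 + a2, b1 + b2, c1 + c2, q1 + q2)
--
--     a, b, c, q = tally(s)
--     return (a * b * q + 2 * a * b * c) % (10**9 + 7)
-- ===== Notes on version B (the rewrite author's own statement) =====
-- stated objective: alternative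
-- what changed: Replaces A's one-pass five-counter loop with a recursive divide-and-conquer tally that splits the string at its midpoint and combines the two halves' count tuples, then folds the three equal products into a*b*q + 2*a*b*c.
import Mathlib
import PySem

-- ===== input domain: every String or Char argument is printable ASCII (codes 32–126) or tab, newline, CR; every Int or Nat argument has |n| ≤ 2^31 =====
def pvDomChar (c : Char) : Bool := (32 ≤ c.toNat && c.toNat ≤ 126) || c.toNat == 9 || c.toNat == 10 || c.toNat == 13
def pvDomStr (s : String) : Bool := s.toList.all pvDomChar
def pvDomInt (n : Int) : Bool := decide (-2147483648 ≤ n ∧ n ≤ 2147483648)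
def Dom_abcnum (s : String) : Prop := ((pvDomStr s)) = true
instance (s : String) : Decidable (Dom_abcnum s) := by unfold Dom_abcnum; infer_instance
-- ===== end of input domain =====

-- B replaces A's one-pass counting loop with a midpoint divide-and-conquer tally and merges the equal products into 2*a*b*c (alternative decomposition, same results).


-- ===== PORT A =====
-- the body of A's for-loop over the characters of s (state a, b, c, abc, q)
def abcnumStep (st : Int × Int × Int × Int × Int) (i : Char) : Int × Int × Int × Int × Int :=
  let (a, b, c, abc, q) := st
  if i == 'A' then (a + 1, b, c, abc, q)
  else if i == 'B' then (a, b + 1, c, abc, q)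
  else if i == 'C' then (a, b, c + 1, abc, q)
  else if i == '?' then (a, b, c, abc, q + 1)
  else (a, b, c, abc, q)

-- literal transliteration: one pass, four counters, then abc += a*b*q + a*c*b + b*c*a, return abc % (10^9+7)
def abcnum (s : String) : Int :=
  let st := s.toList.foldl abcnumStep (0, 0, 0, 0, 0)
  let (a, b, c, abc, q) := st
  let abc := abc + (a * b * q + a * c * b + b * c * a)
  PySem.Int.mod abc (10 ^ 9 + 7)

-- ===== PORT B =====
-- Source B's tally: split at the midpoint, recurse on both halves (t[:m] = take m, t[m:] = drop m), add the tuples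
def abcnumTally (t : List Char) : Int × Int × Int × Int :=
  if _h0 : t.length = 0 then (0, 0, 0, 0)
  else if _h1 : t.length = 1 then
    let ch := t.headI   -- t[0], in range since len(t) = 1
    (if ch == 'A' then 1 else 0, if ch == 'B' then 1 else 0,
     if ch == 'C' then 1 else 0, if ch == '?' then 1 else 0)
  else
    let m := t.length / 2
    let (a1, b1, c1, q1) := abcnumTally (t.take m)
    let (a2, b2, c2, q2) := abcnumTally (t.drop m)
    (a1 + a2, b1 + b2, c1 + c2, q1 + q2)
termination_by t.length
decreasing_by
  · simp only [List.length_take]; omega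
  · simp only [List.length_drop]; omega

def abcnum_alt (s : String) : Int :=
  let (a, b, c, q) := abcnumTally s.toList
  PySem.Int.mod (a * b * q + 2 * a * b * c) (10 ^ 9 + 7)

-- ===== PRECONDITION & SPEC =====
def Spec_abcnum (s : String) (out : Int) : Prop := out = abcnum_alt s
instance (s : String) (out : Int) : Decidable (Spec_abcnum s out) := by unfold Spec_abcnum; infer_instance

-- ===== CLAIM (what is proved, stated in full; the proofs are below) =====
def Claim_equal_abcnum : Prop := ∀ (s : String), Dom_abcnum s → Spec_abcnum s (abcnum s)

-- ===== LEMMAS AND PROOFS =====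

-- B's divide-and-conquer tally computes the four character counts.
theorem tally_eq (t : List Char) :
    abcnumTally t
    = ((t.count 'A' : Int), (t.count 'B' : Int), (t.count 'C' : Int), (t.count '?' : Int)) := by
  induction t using abcnumTally.induct with
  | case1 t h0 => rw [abcnumTally]; simp_all [List.length_eq_zero_iff]
  | case2 t h0 h1 =>
    rw [abcnumTally]
    obtain ⟨ch, rfl⟩ : ∃ c, t = [c] := List.length_eq_one_iff.mp h1
    by_cases hA : ch = 'A' <;> by_cases hB : ch = 'B' <;> by_cases hC : ch = 'C'
      <;> by_cases hQ : ch = '?' <;> simp_all [List.count_cons]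
  | case3 t h0 h1 m a1 b1 c1 q1 heq1 a2 b2 c2 q2 heq2 ih1 ih2 =>
    rw [abcnumTally]
    rw [heq1] at ih1
    rw [heq2] at ih2
    simp only [Prod.mk.injEq] at ih1 ih2
    obtain ⟨rfl, rfl, rfl, rfl⟩ := ih1
    obtain ⟨rfl, rfl, rfl, rfl⟩ := ih2
    have hm : m = t.length / 2 := rfl
    rw [hm] at heq1 heq2
    simp only [h0, h1, dite_false, heq1, heq2]
    have hsplit : ∀ c : Char, (t.take (t.length / 2)).count c + (t.drop (t.length / 2)).count c
        = t.count c := by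
      intro c
      conv_rhs => rw [← List.take_append_drop (t.length / 2) t]
      rw [List.count_append]
    simp only [← hsplit]
    push_cast
    rfl

-- A's fold computes the four counts (abc stays at its initial value).
theorem foldA_eq (l : List Char) (a b c abc q : Int) :
    l.foldl abcnumStep (a, b, c, abc, q)
    = (a + l.count 'A', b + l.count 'B', c + l.count 'C', abc, q + l.count '?') := by
  induction l generalizing a b c abc q with
  | nil => simp
  | cons x t ih =>
    rw [List.foldl_cons]
    by_cases hA : x = 'A'
    · subst hA; simp [abcnumStep, ih]; omega
    · by_cases hB : x = 'B'
      · subst hB; simp [abcnumStep, hA, ih]; omega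
      · by_cases hC : x = 'C'
        · subst hC; simp [abcnumStep, hA, hB, ih]; omega
        · by_cases hQ : x = '?'
          · subst hQ; simp [abcnumStep, hA, hB, hC, ih]; omega
          · simp [abcnumStep, hA, hB, hC, hQ, ih]

-- ===== VERDICT (by name: the statement is the Claim_ definition above) =====
theorem abcnum_spec : Claim_equal_abcnum := by
  intro s _
  show abcnum s = abcnum_alt s
  unfold abcnum abcnum_alt
  rw [foldA_eq, tally_eq]
  congr 1
  ring
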